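-- pv_equiv track=rewrite | github.com/davidchung29/15-112 | cis 15-112/recitation/week 1/pigLatin_starterFile.py | nthUndulatingNumber
-- ===== SOURCE A (Python) =====
-- def is_undulating(n):
--     if n < 100:
--         return False
--     lastDig = n % 10
--     midDig = (n // 10) % 10
--     firstDig = n // 100
--     isAlternate = True
--     while firstDig > 0:
--         digit = firstDig % 10
--         if isAlternate:
--           if digit != lastDig:
--               return False
--         if (not isAlternate):
--             if digit != midDig:
--                 return False
--         isAlternate = not isAlternate
--         firstDig = firstDig // 10
--     return lastDig - midDig != 0
--
-- def nthUndulatingNumber(n):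
--     found = 0
--     guess =0
--     while found <= n :
--         guess += 1
--         if is_undulating(guess):
--             found += 1
--     return guess
-- ===== SOURCE B (Python) =====
-- def nthUndulatingNumber(n):
--     # directly construct the (n+1)-th undulating number: 81 per digit-length,
--     # ordered by length, then leading digit a, then alternating digit b
--     q, r = divmod(n, 81)
--     a, j = divmod(r, 9)
--     a += 1
--     b = j if j < a else j + 1
--     x = 0
--     for i in range(q + 3):
--         x = x * 10 + (a if i % 2 == 0 else b)
--     return x
-- ===== Notes on version B (the rewrite author's own statement) =====
-- stated objective: faster
-- what changed: Instead of testing every integer in turn with a digit-scanning predicate until enough undulating numbers are found, B decomposes the index arithmetically (there are exactly eighty-one undulating numbers of each digit length, ordered by length, then leading digit, then alternating digit) and builds the answer digit by digit in closed form.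
-- outside the precondition, e.g. on nthUndulatingNumber(-1): A returns 0, B returns 98
import Mathlib
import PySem

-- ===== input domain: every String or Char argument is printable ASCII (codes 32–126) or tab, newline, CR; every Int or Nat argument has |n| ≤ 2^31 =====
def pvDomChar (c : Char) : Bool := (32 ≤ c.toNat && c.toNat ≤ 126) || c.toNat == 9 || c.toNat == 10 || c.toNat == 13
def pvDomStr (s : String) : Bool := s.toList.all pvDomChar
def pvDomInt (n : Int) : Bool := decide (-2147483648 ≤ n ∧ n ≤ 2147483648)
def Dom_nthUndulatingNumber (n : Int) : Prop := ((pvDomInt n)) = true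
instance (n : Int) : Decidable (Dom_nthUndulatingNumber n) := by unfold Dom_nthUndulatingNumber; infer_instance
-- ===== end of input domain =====

-- B replaces A's scan of every integer with a closed-form construction of the requested
-- undulating number from its index (eighty-one such numbers per digit length, ordered by
-- length, then leading digit, then alternating digit); intended as faster — the timing
-- run read B ~500x faster at the largest size where A still finished and A timed out
-- beyond it, though with too few finished samples of A to confirm the label.


-- ===== PORT A =====
-- the inner `while firstDig > 0` loop of is_undulating; the base case is the
-- `return lastDig - midDig != 0` the Python reaches when the loop falls through
def undLoop (firstDig lastDig midDig : Int) (isAlternate : Bool) : Bool :=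
  if _h : 0 < firstDig then
    let digit := PySem.Int.mod firstDig 10
    if isAlternate && decide (digit ≠ lastDig) then false
    else if !isAlternate && decide (digit ≠ midDig) then false
    else undLoop (PySem.Int.floordiv firstDig 10) lastDig midDig (!isAlternate)
  else decide (lastDig - midDig ≠ 0)
termination_by firstDig.toNat
decreasing_by
  rw [PySem.Int.floordiv_eq_ediv_of_pos (by norm_num : (0:Int) < 10)]
  omega

def isUndulating (n : Int) : Bool :=
  if n < 100 then false
  else
    let lastDig := PySem.Int.mod n 10
    let midDig := PySem.Int.mod (PySem.Int.floordiv n 10) 10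
    let firstDig := PySem.Int.floordiv n 100
    undLoop firstDig lastDig midDig true

-- the `while found <= n` search loop; fuel is an explicit upper bound on the number of
-- iterations (proved sufficient below), making the while-loop total
def aLoop (fuel : Nat) (n guess found : Int) : Int :=
  match fuel with
  | 0 => guess
  | fuel + 1 =>
    if found ≤ n then
      let guess' := guess + 1
      let found' := if isUndulating guess' then found + 1 else found
      aLoop fuel n guess' found'
    else guess

def nthUndulatingNumber (n : Int) : Int := aLoop (10 ^ (n.toNat / 81 + 3)) n 0 0

-- ===== PORT B =====
def nthUndulatingNumber_alt (n : Int) : Int :=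
  let q := PySem.Int.floordiv n 81
  let r := PySem.Int.mod n 81
  let a := PySem.Int.floordiv r 9 + 1
  let j := PySem.Int.mod r 9
  let b := if j < a then j else j + 1
  (PySem.List.pyRange 0 (q + 3) 1).foldl
    (fun x i => x * 10 + (if PySem.Int.mod i 2 = 0 then a else b)) 0

-- ===== PRECONDITION & SPEC =====
-- Pre_ restricts to n ≥ 0, the natural domain of an "n-th element" query; for negative n
-- A's while loop never runs and it returns its never-advanced initial guess.
def Pre_nthUndulatingNumber (n : Int) : Prop := 0 ≤ n
instance (n : Int) : Decidable (Pre_nthUndulatingNumber n) := by unfold Pre_nthUndulatingNumber; infer_instance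
def pvWitness_nthUndulatingNumber : Int := 2

def Spec_nthUndulatingNumber (n : Int) (out : Int) : Prop := out = nthUndulatingNumber_alt n
instance (n : Int) (out : Int) : Decidable (Spec_nthUndulatingNumber n out) := by unfold Spec_nthUndulatingNumber; infer_instance

-- ===== CLAIM (what is proved, stated in full; the proofs are below) =====
def Claim_equal_nthUndulatingNumber : Prop := ∀ (n : Int), Dom_nthUndulatingNumber n → Pre_nthUndulatingNumber n → Spec_nthUndulatingNumber n (nthUndulatingNumber n)

-- ===== LEMMAS AND PROOFS =====

-- Nat-level shadow of the pattern: wN L a b = the L-digit number whose digits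
-- (most significant first) alternate a, b, a, b, …
def wN : Nat → Nat → Nat → Nat
  | 0, _, _ => 0
  | L + 1, a, b => 10 * wN L a b + (if L % 2 = 0 then a else b)

-- the same numbers indexed from the other end: vN M x y has least-significant-first
-- digits x, y, x, y, …
def vN : Nat → Nat → Nat → Nat
  | 0, _, _ => 0
  | M + 1, x, y => 10 * vN M y x + x

-- closed form for the k-th (0-indexed) undulating number
def uN (k : Nat) : Nat :=
  wN (k / 81 + 3) (k % 81 / 9 + 1)
    (if k % 81 % 9 < k % 81 / 9 + 1 then k % 81 % 9 else k % 81 % 9 + 1)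

-- Nat-level shadow of A's digit loop
def undLoopN : Nat → Nat → Nat → Bool → Bool
  | f, p, q, alt =>
    if h : 0 < f then
      if alt && decide (f % 10 ≠ p) then false
      else if !alt && decide (f % 10 ≠ q) then false
      else undLoopN (f / 10) p q (!alt)
    else decide (p ≠ q)
termination_by f _ _ _ => f
decreasing_by omega

def isUndulatingN (m : Nat) : Bool :=
  if m < 100 then false else undLoopN (m / 100) (m % 10) (m / 10 % 10) true

theorem undLoop_cast (f p q : Nat) (alt : Bool) :
    undLoop (f : Int) (p : Int) (q : Int) alt = undLoopN f p q alt := by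
  induction f using Nat.strong_induction_on generalizing alt with
  | _ f ih =>
    rw [undLoop, undLoopN]
    by_cases hf : 0 < f
    · have hf' : (0 : Int) < (f : Int) := by exact_mod_cast hf
      have hmod : PySem.Int.mod (f : Int) 10 = ((f % 10 : Nat) : Int) := by
        rw [PySem.Int.mod_eq_emod_of_pos (by norm_num)]; omega
      have hdiv : PySem.Int.floordiv (f : Int) 10 = ((f / 10 : Nat) : Int) := by
        rw [PySem.Int.floordiv_eq_ediv_of_pos (by norm_num)]; omega
      have hdec : decide ((((f % 10 : Nat)) : Int) ≠ (p : Int)) = decide (f % 10 ≠ p) := by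
        rw [decide_eq_decide]; omega
      have hdec' : decide ((((f % 10 : Nat)) : Int) ≠ (q : Int)) = decide (f % 10 ≠ q) := by
        rw [decide_eq_decide]; omega
      simp only [hf, hf', dif_pos, hmod, hdiv, hdec, hdec']
      have hrec := ih (f / 10) (by omega) (!alt)
      split
      · rfl
      · split
        · rfl
        · exact hrec
    · have hf' : ¬ (0 : Int) < (f : Int) := by exact_mod_cast hf
      simp only [hf, hf', dif_neg, not_false_iff]
      have : ((p : Int) - (q : Int) ≠ 0) ↔ (p ≠ q) := by omega
      simp [this]

theorem isUndulating_cast (m : Nat) : isUndulating (m : Int) = isUndulatingN m := by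
  unfold isUndulating isUndulatingN
  by_cases hm : m < 100
  · have : ((m : Int) < 100) := by exact_mod_cast hm
    simp [this, hm]
  · have h1 : ¬ ((m : Int) < 100) := by exact_mod_cast hm
    have hmod : PySem.Int.mod (m : Int) 10 = ((m % 10 : Nat) : Int) := by
      rw [PySem.Int.mod_eq_emod_of_pos (by norm_num)]; omega
    have hdiv10 : PySem.Int.floordiv (m : Int) 10 = ((m / 10 : Nat) : Int) := by
      rw [PySem.Int.floordiv_eq_ediv_of_pos (by norm_num)]; omega
    have hmod2 : PySem.Int.mod ((m / 10 : Nat) : Int) 10 = ((m / 10 % 10 : Nat) : Int) := by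
      rw [PySem.Int.mod_eq_emod_of_pos (by norm_num)]; omega
    have hdiv100 : PySem.Int.floordiv (m : Int) 100 = ((m / 100 : Nat) : Int) := by
      rw [PySem.Int.floordiv_eq_ediv_of_pos (by norm_num)]; omega
    simp only [h1, hm, if_neg, not_false_iff, hmod, hdiv10, hmod2, hdiv100]
    exact undLoop_cast (m / 100) (m % 10) (m / 10 % 10) true

-- digit split of vN
theorem vN_succ (M x y : Nat) : vN (M + 1) x y = 10 * vN M y x + x := rfl

theorem vN_mod10 (M x y : Nat) (hx : x ≤ 9) : vN (M + 1) x y % 10 = x := by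
  rw [vN_succ]; omega

theorem vN_div10 (M x y : Nat) (hx : x ≤ 9) : vN (M + 1) x y / 10 = vN M y x := by
  rw [vN_succ]; omega

-- A's digit loop accepts every vN-number
theorem undLoopN_vN (M p q : Nat) (alt : Bool) (hp : p ≤ 9) (hq : q ≤ 9) (hpq : p ≠ q) :
    undLoopN (vN M (if alt then p else q) (if alt then q else p)) p q alt = true := by
  induction M generalizing alt with
  | zero => rw [undLoopN]; simp [vN, hpq]
  | succ M ih =>
    rw [undLoopN]
    cases alt with
    | true =>
      simp only [if_true]
      by_cases h0 : 0 < vN (M + 1) p q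
      · rw [dif_pos h0, vN_mod10 M p q hp, vN_div10 M p q hp]
        simp only [ne_eq, not_true_eq_false, decide_false,
          Bool.and_false, Bool.false_eq_true, if_false, Bool.not_true,
          Bool.false_and]
        have := ih false
        simp only [Bool.false_eq_true, if_false] at this
        simpa using this
      · rw [dif_neg h0]; simp [hpq]
    | false =>
      simp only [Bool.false_eq_true, if_false]
      by_cases h0 : 0 < vN (M + 1) q p
      · rw [dif_pos h0, vN_mod10 M q p hq, vN_div10 M q p hq]
        have := ih true
        simp only [if_true] at this
        simpa using this
      · rw [dif_neg h0]; simp [hpq]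

-- A's digit loop only accepts vN-numbers (with a nonzero leading digit)
theorem undLoopN_complete (f p q : Nat) (alt : Bool) (h : undLoopN f p q alt = true) :
    p ≠ q ∧ ∃ M, f = vN M (if alt then p else q) (if alt then q else p) ∧
      (f = 0 → M = 0) ∧ (0 < f → 10 ^ (M - 1) ≤ f ∧ 1 ≤ M) := by
  induction f using Nat.strong_induction_on generalizing alt with
  | _ f ih =>
    rw [undLoopN] at h
    by_cases hf : 0 < f
    · simp only [hf, dif_pos] at h
      have hb1 : ¬ (alt && decide (f % 10 ≠ p)) = true := by
        intro hcon; rw [if_pos hcon] at h; exact Bool.false_ne_true h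
      rw [if_neg hb1] at h
      have hb2 : ¬ (!alt && decide (f % 10 ≠ q)) = true := by
        intro hcon; rw [if_pos hcon] at h; exact Bool.false_ne_true h
      rw [if_neg hb2] at h
      obtain ⟨hpq, M', hM', hz', hbd'⟩ := ih (f / 10) (by omega) (!alt) h
      refine ⟨hpq, M' + 1, ?_, by omega, ?_⟩
      · have hdig : f % 10 = (if alt then p else q) := by
          cases alt with
          | true => simp at hb1; simpa using hb1
          | false => simp at hb2; simpa using hb2
        have : vN (M' + 1) (if alt then p else q) (if alt then q else p)
            = 10 * vN M' (if alt then q else p) (if alt then p else q) + (if alt then p else q) := by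
          rw [vN_succ]
        rw [this]
        have hsw : vN M' (if alt then q else p) (if alt then p else q)
            = vN M' (if !alt then p else q) (if !alt then q else p) := by
          cases alt <;> simp
        rw [hsw, ← hM', ← hdig]
        omega
      · intro _
        by_cases hf10 : 0 < f / 10
        · obtain ⟨hle, hM1⟩ := hbd' hf10
          have : 10 ^ (M' + 1 - 1) = 10 ^ (M' - 1) * 10 := by
            rw [← pow_succ]; congr 1; omega
          refine ⟨?_, by omega⟩
          rw [this]
          omega
        · have hM0 : M' = 0 := hz' (by omega)
          subst hM0
          simp only [Nat.add_sub_cancel, pow_zero]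
          omega
    · simp only [hf, dif_neg, not_false_iff] at h
      refine ⟨by simpa using h, 0, ?_, fun _ => rfl, by omega⟩
      simp [vN]; omega

theorem wN_succ (L a b : Nat) : wN (L + 1) a b = 10 * wN L a b + (if L % 2 = 0 then a else b) := rfl

-- linear decomposition of wN
theorem wN_linear (L a b : Nat) : wN L a b = a * wN L 1 0 + b * wN L 0 1 := by
  induction L with
  | zero => simp [wN]
  | succ L ih => by_cases h : L % 2 = 0 <;> simp [wN, h, ih] <;> ring

theorem wN_coef (L : Nat) : 9 * wN (L + 1) 0 1 < wN (L + 1) 1 0 := by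
  induction L with
  | zero => simp [wN]
  | succ L ih =>
    rw [wN_succ (L + 1) 0 1, wN_succ (L + 1) 1 0]
    by_cases hp : (L + 1) % 2 = 0 <;> simp only [hp, if_true, if_false] <;> omega

theorem wN_lb (L a b : Nat) (ha : 1 ≤ a) : 10 ^ L ≤ wN (L + 1) a b := by
  induction L with
  | zero => simp [wN]; omega
  | succ L ih =>
    rw [wN_succ, pow_succ]
    omega

theorem wN_ub (L a b : Nat) (ha : a ≤ 9) (hb : b ≤ 9) : wN L a b < 10 ^ L := by
  induction L with
  | zero => simp [wN]
  | succ L ih =>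
    have hd : (if L % 2 = 0 then a else b) ≤ 9 := by split <;> omega
    rw [wN_succ, pow_succ]
    omega

-- sharper upper bound by leading digit
theorem wN_ub' (L a b : Nat) (ha : a ≤ 9) (hb : b ≤ 9) :
    wN (L + 1) a b < (a + 1) * 10 ^ L := by
  induction L with
  | zero => simp [wN]
  | succ L ih =>
    have hd : (if (L + 1) % 2 = 0 then a else b) ≤ 9 := by split <;> omega
    rw [wN_succ, pow_succ]
    nlinarith

theorem uN_pos (k : Nat) : 100 ≤ uN k := by
  unfold uN
  have := wN_lb (k / 81 + 2) (k % 81 / 9 + 1)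
    (if k % 81 % 9 < k % 81 / 9 + 1 then k % 81 % 9 else k % 81 % 9 + 1) (by omega)
  have h100 : (100 : Nat) ≤ 10 ^ (k / 81 + 2) := by
    calc (100:Nat) = 10 ^ 2 := by norm_num
    _ ≤ 10 ^ (k / 81 + 2) := Nat.pow_le_pow_right (by norm_num) (by omega)
  have he : k / 81 + 2 + 1 = k / 81 + 3 := by omega
  rw [he] at this
  omega

-- wN expressed as vN
theorem wN_B_pos (L : Nat) : 1 ≤ wN (L + 2) 0 1 := by
  induction L with
  | zero => simp [wN]
  | succ L ih => rw [wN_succ]; omega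

theorem wN_eq_vN (L a b : Nat) :
    wN L a b = vN L (if (L - 1) % 2 = 0 then a else b) (if (L - 2) % 2 = 0 then a else b) := by
  induction L with
  | zero => simp [wN, vN]
  | succ L ih =>
    cases L with
    | zero => simp [wN, vN]
    | succ L' =>
      cases L' with
      | zero => norm_num [wN, vN]
      | succ L'' =>
        have h1 : L'' + 1 + 1 + 1 - 1 = L'' + 1 + 1 := by omega
        have h2 : L'' + 1 + 1 + 1 - 2 = L'' + 1 := by omega
        have h3 : L'' + 1 + 1 - 1 = L'' + 1 := by omega
        have h4 : L'' + 1 + 1 - 2 = L'' := by omega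
        have h5 : (if (L'' + 1 + 1) % 2 = 0 then a else b) = (if L'' % 2 = 0 then a else b) := by
          have : (L'' + 1 + 1) % 2 = L'' % 2 := by omega
          rw [this]
        rw [wN_succ, ih, h1, h2, h3, h4, h5, vN_succ (L'' + 1 + 1)]

-- monotonicity of the closed form
theorem uN_lt_succ (k : Nat) : uN k < uN (k + 1) := by
  unfold uN
  by_cases h1 : k % 81 % 9 < 8
  · -- same length, same leading digit, second digit grows
    have e1 : (k + 1) / 81 = k / 81 := by omega
    have e2 : (k + 1) % 81 = k % 81 + 1 := by omega
    rw [e1, e2]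
    have e3 : (k % 81 + 1) / 9 = k % 81 / 9 := by omega
    have e4 : (k % 81 + 1) % 9 = k % 81 % 9 + 1 := by omega
    rw [e3, e4]
    rw [wN_linear (k / 81 + 3) (k % 81 / 9 + 1)
          (if k % 81 % 9 < k % 81 / 9 + 1 then k % 81 % 9 else k % 81 % 9 + 1),
        wN_linear (k / 81 + 3) (k % 81 / 9 + 1)
          (if k % 81 % 9 + 1 < k % 81 / 9 + 1 then k % 81 % 9 + 1 else k % 81 % 9 + 1 + 1)]
    have hb : (if k % 81 % 9 < k % 81 / 9 + 1 then k % 81 % 9 else k % 81 % 9 + 1) + 1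
        ≤ (if k % 81 % 9 + 1 < k % 81 / 9 + 1 then k % 81 % 9 + 1 else k % 81 % 9 + 1 + 1) := by
      split <;> split <;> omega
    have hB : 1 ≤ wN (k / 81 + 3) 0 1 := by
      have he : k / 81 + 3 = k / 81 + 1 + 2 := by omega
      rw [he]; exact wN_B_pos _
    nlinarith [hb, hB]
  · by_cases h2 : k % 81 < 80
    · -- leading digit grows, second digit resets to 0
      have e1 : (k + 1) / 81 = k / 81 := by omega
      have e2 : (k + 1) % 81 = k % 81 + 1 := by omega
      rw [e1, e2]
      have e3 : (k % 81 + 1) / 9 = k % 81 / 9 + 1 := by omega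
      have e4 : (k % 81 + 1) % 9 = 0 := by omega
      rw [e3, e4]
      have e5 : (if (0 : Nat) < k % 81 / 9 + 1 + 1 then (0 : Nat) else 0 + 1) = 0 := by
        rw [if_pos (by omega)]
      rw [e5]
      have hb9 : (if k % 81 % 9 < k % 81 / 9 + 1 then k % 81 % 9 else k % 81 % 9 + 1) ≤ 9 := by
        split <;> omega
      have hco : 9 * wN (k / 81 + 3) 0 1 < wN (k / 81 + 3) 1 0 := by
        have he : k / 81 + 3 = k / 81 + 2 + 1 := by omega
        rw [he]; exact wN_coef _
      rw [wN_linear (k / 81 + 3) (k % 81 / 9 + 1)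
            (if k % 81 % 9 < k % 81 / 9 + 1 then k % 81 % 9 else k % 81 % 9 + 1),
          wN_linear (k / 81 + 3) (k % 81 / 9 + 1 + 1) 0]
      nlinarith [hb9, hco]
    · -- length grows
      have h80 : k % 81 = 80 := by omega
      have e1 : (k + 1) / 81 = k / 81 + 1 := by omega
      have e2 : (k + 1) % 81 = 0 := by omega
      rw [e1, e2, h80]
      norm_num
      have hub : wN (k / 81 + 3) 9 8 < 10 ^ (k / 81 + 3) :=
        wN_ub _ 9 8 (by omega) (by omega)
      have hlb : 10 ^ (k / 81 + 3) ≤ wN (k / 81 + 3 + 1) 1 0 := wN_lb _ 1 0 (by omega)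
      have he : k / 81 + 3 + 1 = k / 81 + 1 + 3 := by omega
      rw [he] at hlb
      omega

theorem uN_strictMono : StrictMono uN :=
  strictMono_nat_of_lt_succ uN_lt_succ

theorem uN_mono : Monotone uN := uN_strictMono.monotone

-- soundness: every uN k passes A's test
theorem isUndulatingN_uN (k : Nat) : isUndulatingN (uN k) = true := by
  have h100 := uN_pos k
  unfold isUndulatingN
  rw [if_neg (by omega)]
  have hx9 : (if (k / 81 + 2) % 2 = 0 then k % 81 / 9 + 1
      else (if k % 81 % 9 < k % 81 / 9 + 1 then k % 81 % 9 else k % 81 % 9 + 1)) ≤ 9 := by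
    split <;> [omega; (split <;> omega)]
  have hy9 : (if (k / 81 + 1) % 2 = 0 then k % 81 / 9 + 1
      else (if k % 81 % 9 < k % 81 / 9 + 1 then k % 81 % 9 else k % 81 % 9 + 1)) ≤ 9 := by
    split <;> [omega; (split <;> omega)]
  have hab : k % 81 / 9 + 1 ≠ (if k % 81 % 9 < k % 81 / 9 + 1 then k % 81 % 9 else k % 81 % 9 + 1) := by
    split <;> omega
  have hxy : (if (k / 81 + 2) % 2 = 0 then k % 81 / 9 + 1
      else (if k % 81 % 9 < k % 81 / 9 + 1 then k % 81 % 9 else k % 81 % 9 + 1))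
      ≠ (if (k / 81 + 1) % 2 = 0 then k % 81 / 9 + 1
      else (if k % 81 % 9 < k % 81 / 9 + 1 then k % 81 % 9 else k % 81 % 9 + 1)) := by
    have hpar : (k / 81 + 2) % 2 ≠ (k / 81 + 1) % 2 := by omega
    by_cases hc : (k / 81 + 2) % 2 = 0
    · rw [if_pos hc, if_neg (show ¬ (k / 81 + 1) % 2 = 0 by omega)]; exact hab
    · rw [if_neg hc, if_pos (show (k / 81 + 1) % 2 = 0 by omega)]; exact (Ne.symm hab)
  have huv : uN k = vN (k / 81 + 3)
      (if (k / 81 + 2) % 2 = 0 then k % 81 / 9 + 1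
        else (if k % 81 % 9 < k % 81 / 9 + 1 then k % 81 % 9 else k % 81 % 9 + 1))
      (if (k / 81 + 1) % 2 = 0 then k % 81 / 9 + 1
        else (if k % 81 % 9 < k % 81 / 9 + 1 then k % 81 % 9 else k % 81 % 9 + 1)) := by
    unfold uN
    rw [wN_eq_vN]
    have h1 : k / 81 + 3 - 1 = k / 81 + 2 := by omega
    have h2 : k / 81 + 3 - 2 = k / 81 + 1 := by omega
    rw [h1, h2]
  set x := (if (k / 81 + 2) % 2 = 0 then k % 81 / 9 + 1
      else (if k % 81 % 9 < k % 81 / 9 + 1 then k % 81 % 9 else k % 81 % 9 + 1)) with hxdef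
  set y := (if (k / 81 + 1) % 2 = 0 then k % 81 / 9 + 1
      else (if k % 81 % 9 < k % 81 / 9 + 1 then k % 81 % 9 else k % 81 % 9 + 1)) with hydef
  have hm10 : uN k % 10 = x := by
    rw [huv, show k / 81 + 3 = k / 81 + 2 + 1 from by omega, vN_mod10 _ _ _ hx9]
  have hd10 : uN k / 10 = vN (k / 81 + 2) y x := by
    rw [huv, show k / 81 + 3 = k / 81 + 2 + 1 from by omega, vN_div10 _ _ _ hx9]
  have hm2 : uN k / 10 % 10 = y := by
    rw [hd10, show k / 81 + 2 = k / 81 + 1 + 1 from by omega, vN_mod10 _ _ _ hy9]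
  have hd100 : uN k / 100 = vN (k / 81 + 1) x y := by
    rw [show (100 : Nat) = 10 * 10 from rfl, ← Nat.div_div_eq_div_mul, hd10,
      show k / 81 + 2 = k / 81 + 1 + 1 from by omega, vN_div10 _ _ _ hy9]
  rw [hm10, hm2, hd100]
  have := undLoopN_vN (k / 81 + 1) x y true hx9 hy9 hxy
  simpa using this

-- completeness: everything passing A's test is some uN k
-- reconstruct the index k of an undulating number from its length and digit pair
theorem uN_of_form (M a b : Nat) (hM : 1 ≤ M) (ha1 : 1 ≤ a) (ha9 : a ≤ 9) (hb9 : b ≤ 9)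
    (hab : a ≠ b) : uN (81 * (M - 1) + 9 * (a - 1) + (if b < a then b else b - 1)) = wN (M + 2) a b := by
  have hj9 : (if b < a then b else b - 1) ≤ 8 := by split <;> omega
  unfold uN
  have e1 : (81 * (M - 1) + 9 * (a - 1) + (if b < a then b else b - 1)) / 81 = M - 1 := by omega
  have e2 : (81 * (M - 1) + 9 * (a - 1) + (if b < a then b else b - 1)) % 81
      = 9 * (a - 1) + (if b < a then b else b - 1) := by omega
  rw [e1, e2]
  have e3 : (9 * (a - 1) + (if b < a then b else b - 1)) / 9 = a - 1 := by omega
  have e4 : (9 * (a - 1) + (if b < a then b else b - 1)) % 9 = (if b < a then b else b - 1) := by omega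
  rw [e3, e4]
  have e5 : a - 1 + 1 = a := by omega
  rw [e5]
  have e6 : (if (if b < a then b else b - 1) < a then (if b < a then b else b - 1)
      else (if b < a then b else b - 1) + 1) = b := by
    by_cases hba : b < a
    · rw [if_pos hba, if_pos hba]
    · rw [if_neg hba, if_neg (by omega)]; omega
  rw [e6]
  have e7 : M - 1 + 3 = M + 2 := by omega
  rw [e7]

theorem isUndulatingN_complete (m : Nat) (h : isUndulatingN m = true) : ∃ k, uN k = m := by
  unfold isUndulatingN at h
  by_cases hm : m < 100
  · rw [if_pos hm] at h; exact absurd h (by simp)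
  · rw [if_neg hm] at h
    obtain ⟨hpq, M, hM, hz, hbd⟩ := undLoopN_complete (m / 100) (m % 10) (m / 10 % 10) true h
    simp only [if_true] at hM
    have hf : 0 < m / 100 := by omega
    obtain ⟨hle, hM1⟩ := hbd hf
    -- m itself is the v-number of length M+2
    have hm' : m = vN (M + 2) (m % 10) (m / 10 % 10) := by
      have hv : vN (M + 2) (m % 10) (m / 10 % 10)
          = 10 * (10 * vN M (m % 10) (m / 10 % 10) + m / 10 % 10) + m % 10 := by
        rw [vN_succ, vN_succ]
      rw [hv, ← hM]
      omega
    -- m is at least 10^(M+1)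
    have hlow : 10 ^ (M + 1) ≤ m := by
      have : 10 ^ (M - 1) * 100 ≤ (m / 100) * 100 := Nat.mul_le_mul_right _ hle
      have hpow : 10 ^ (M - 1) * 100 = 10 ^ (M + 1) := by
        have : M - 1 + 2 = M + 1 := by omega
        rw [← this, pow_add]; norm_num
      omega
    -- choose the (a, b) orientation by the parity of the length
    have key : ∀ a b : Nat, a ≤ 9 → b ≤ 9 → a ≠ b → wN (M + 2) a b = m → ∃ k, uN k = m := by
      intro a b ha9 hb9 hab hw
      have ha1 : 1 ≤ a := by
        by_contra hc
        have ha0 : a = 0 := by omega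
        have := wN_ub' (M + 1) a b ha9 hb9
        rw [hw, ha0] at this
        omega
      exact ⟨81 * (M - 1) + 9 * (a - 1) + (if b < a then b else b - 1),
        by rw [uN_of_form M a b hM1 ha1 ha9 hb9 hab, hw]⟩
    have hwv := wN_eq_vN (M + 2)
    have hd09 : m % 10 ≤ 9 := by omega
    have hd19 : m / 10 % 10 ≤ 9 := by omega
    by_cases hpar : (M + 2 - 1) % 2 = 0
    · -- length-(M+2) numbers have x = a
      apply key (m % 10) (m / 10 % 10) hd09 hd19 hpq
      rw [hwv (m % 10) (m / 10 % 10), if_pos hpar, if_neg (by omega), ← hm']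
    · apply key (m / 10 % 10) (m % 10) hd19 hd09 (Ne.symm hpq)
      rw [hwv (m / 10 % 10) (m % 10), if_neg hpar, if_pos (by omega), ← hm']

theorem uN_ub (k : Nat) : uN k < 10 ^ (k / 81 + 3) := by
  apply wN_ub
  · omega
  · split <;> omega

theorem aLoop_exit (fuel : Nat) (n guess found : Int) (h : ¬ found ≤ n) :
    aLoop fuel n guess found = guess := by
  cases fuel <;> simp [aLoop, h]

theorem aLoop_main (fuel nN k g : Nat) (hk : k ≤ nN)
    (hinv : ∀ m : Nat, g < m → isUndulatingN m = true → uN k ≤ m)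
    (hg : g < uN k) (hfuel : uN nN - g ≤ fuel) :
    aLoop fuel (nN : Int) (g : Int) (k : Int) = (uN nN : Int) := by
  induction fuel generalizing k g with
  | zero =>
    exfalso
    have := uN_mono hk
    omega
  | succ fuel ih =>
    rw [aLoop]
    rw [if_pos (show (k : Int) ≤ (nN : Int) by exact_mod_cast hk)]
    have hguess : ((g : Int) + 1) = ((g + 1 : Nat) : Int) := by push_cast; ring
    simp only [hguess, isUndulating_cast]
    by_cases hU : isUndulatingN (g + 1) = true
    · have huk : g + 1 = uN k := by
        have := hinv (g + 1) (by omega) hU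
        omega
      rw [hU, if_pos rfl]
      have hfound : ((k : Int) + 1) = ((k + 1 : Nat) : Int) := by push_cast; ring
      rw [hfound]
      by_cases hkn : k = nN
      · subst hkn
        rw [aLoop_exit _ _ _ _ (by exact_mod_cast (by omega : ¬ (k + 1 ≤ k)))]
        exact_mod_cast congrArg (fun z => ((z : Nat) : Int)) huk
      · apply ih (k + 1) (g + 1) (by omega)
        · intro m hm hUm
          obtain ⟨k', hk'⟩ := isUndulatingN_complete m hUm
          have hlt : uN k < uN k' := by omega
          have : k < k' := uN_strictMono.lt_iff_lt.mp hlt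
          have := uN_mono (show k + 1 ≤ k' by omega)
          omega
        · have := uN_lt_succ k
          omega
        · omega
    · have hne : g + 1 ≠ uN k := by
        intro he
        rw [he] at hU
        exact hU (isUndulatingN_uN k)
      rw [Bool.not_eq_true] at hU
      rw [hU, if_neg (by simp)]
      apply ih k (g + 1) hk
      · intro m hm hUm
        exact hinv m (by omega) hUm
      · omega
      · omega

theorem foldB (L aN bN : Nat) :
    (List.range L).foldl
      (fun (x : Int) (kk : Nat) => x * 10 + (if PySem.Int.mod (0 + (kk : Int)) 2 = 0 then (aN : Int) else (bN : Int))) 0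
      = ((wN L aN bN : Nat) : Int) := by
  induction L with
  | zero => simp [wN]
  | succ L ih =>
    rw [List.range_succ, List.foldl_append, List.foldl_cons, List.foldl_nil, ih]
    have hmod : PySem.Int.mod (0 + (L : Int)) 2 = ((L % 2 : Nat) : Int) := by
      rw [PySem.Int.mod_eq_emod_of_pos (by norm_num)]; omega
    rw [hmod, wN_succ]
    by_cases hp : L % 2 = 0
    · rw [if_pos (by exact_mod_cast hp)]
      push_cast [hp]
      ring
    · rw [if_neg (by exact_mod_cast hp)]
      have : (if L % 2 = 0 then aN else bN) = bN := by rw [if_neg hp]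
      rw [this]
      push_cast
      ring

theorem alt_eq (n : Int) (hn : 0 ≤ n) : nthUndulatingNumber_alt n = (uN n.toNat : Int) := by
  obtain ⟨m, rfl⟩ : ∃ m : Nat, n = (m : Int) := ⟨n.toNat, by omega⟩
  unfold nthUndulatingNumber_alt
  have hq : PySem.Int.floordiv (m : Int) 81 = ((m / 81 : Nat) : Int) := by
    rw [PySem.Int.floordiv_eq_ediv_of_pos (by norm_num)]; omega
  have hr : PySem.Int.mod (m : Int) 81 = ((m % 81 : Nat) : Int) := by
    rw [PySem.Int.mod_eq_emod_of_pos (by norm_num)]; omega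
  have ha : PySem.Int.floordiv ((m % 81 : Nat) : Int) 9 + 1 = ((m % 81 / 9 + 1 : Nat) : Int) := by
    rw [PySem.Int.floordiv_eq_ediv_of_pos (by norm_num)]; push_cast; omega
  have hj : PySem.Int.mod ((m % 81 : Nat) : Int) 9 = ((m % 81 % 9 : Nat) : Int) := by
    rw [PySem.Int.mod_eq_emod_of_pos (by norm_num)]; omega
  simp only [hq, hr, ha, hj]
  have hb : (if ((m % 81 % 9 : Nat) : Int) < ((m % 81 / 9 + 1 : Nat) : Int)
      then ((m % 81 % 9 : Nat) : Int) else ((m % 81 % 9 : Nat) : Int) + 1)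
      = (((if m % 81 % 9 < m % 81 / 9 + 1 then m % 81 % 9 else m % 81 % 9 + 1) : Nat) : Int) := by
    by_cases hc : m % 81 % 9 < m % 81 / 9 + 1
    · rw [if_pos (by exact_mod_cast hc), if_pos hc]
    · rw [if_neg (by exact_mod_cast hc), if_neg hc]; push_cast; ring
  simp only [hb]
  have hrange : ((m / 81 : Nat) : Int) + 3 = ((m / 81 + 3 : Nat) : Int) := by push_cast; ring
  rw [hrange, PySem.List.pyRange_one 0 ((m / 81 + 3 : Nat) : Int)]
  have htn : ((((m / 81 + 3 : Nat) : Int) - 0)).toNat = m / 81 + 3 := by omega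
  rw [htn, List.foldl_map]
  have := foldB (m / 81 + 3) (m % 81 / 9 + 1) (if m % 81 % 9 < m % 81 / 9 + 1 then m % 81 % 9 else m % 81 % 9 + 1)
  rw [this]
  unfold uN
  simp

-- ===== VERDICT (by name: the statement is the Claim_ definition above) =====
theorem nthUndulatingNumber_spec : Claim_equal_nthUndulatingNumber := by
  intro n _ hpre
  have hpre : 0 ≤ n := hpre
  unfold Spec_nthUndulatingNumber
  rw [alt_eq n hpre]
  unfold nthUndulatingNumber
  have h0 : n = ((n.toNat : Nat) : Int) := by omega
  rw [h0]
  apply aLoop_main _ _ 0 0 (by omega)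
  · intro m _ hm
    obtain ⟨k, hk⟩ := isUndulatingN_complete m hm
    subst hk; exact uN_mono (Nat.zero_le k)
  · have := uN_pos 0
    omega
  · have := uN_ub n.toNat
    simp only [Int.toNat_natCast]
    omega
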